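-- pv_equiv track=rewrite | github.com/Russel88/MAGinator | maginator/workflow/scripts/mpileup.py | delete_keys_dict
-- ===== SOURCE A (Python) =====
-- import copy
--
-- def delete_keys_dict(dct, keys):
--     '''
--     Will delete keys (keys) from the second layer dictionaries of a deep copy of the input dictionary (dct)
--     '''
--     dct_copy = copy.deepcopy(dct)
--     for k in keys:
--         for kk in dct:
--             try:
--                 del dct_copy[kk][k]
--             except KeyError:
--                 pass
--     return(dct_copy)
-- ===== SOURCE B (Python) =====
-- def delete_keys_dict(dct, keys):
--     '''
--     Return a fresh dict whose inner dicts are those of dct with the given keys removed.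
--     '''
--     key_set = set(keys)
--     return {k: {kk: v for kk, v in inner.items() if kk not in key_set}
--             for k, inner in dct.items()}
-- ===== Notes on version B (the rewrite author's own statement) =====
-- stated objective: simpler
-- what changed: Replaces deepcopy followed by nested delete loops (for every key, scan every outer key and del with try/except KeyError) by a single dict comprehension that builds fresh inner dicts filtering entries against a set of the keys to remove.
import Mathlib
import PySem

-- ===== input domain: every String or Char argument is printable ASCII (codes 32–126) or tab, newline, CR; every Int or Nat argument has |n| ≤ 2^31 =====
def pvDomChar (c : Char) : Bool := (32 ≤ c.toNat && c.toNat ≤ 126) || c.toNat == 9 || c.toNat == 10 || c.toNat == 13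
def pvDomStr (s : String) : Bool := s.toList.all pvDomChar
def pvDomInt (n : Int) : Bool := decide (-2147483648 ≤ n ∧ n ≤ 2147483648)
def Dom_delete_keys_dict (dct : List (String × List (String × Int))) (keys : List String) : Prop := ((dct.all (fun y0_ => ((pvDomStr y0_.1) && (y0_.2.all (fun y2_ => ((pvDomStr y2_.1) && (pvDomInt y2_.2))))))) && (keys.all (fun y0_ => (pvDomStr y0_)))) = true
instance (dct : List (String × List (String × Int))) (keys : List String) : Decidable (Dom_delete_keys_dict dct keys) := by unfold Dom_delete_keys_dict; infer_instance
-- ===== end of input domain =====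

-- B replaces A's deepcopy-then-nested-delete with one build-fresh filtering pass (return-value
-- equivalence only; neither program mutates its arguments).

-- ===== PORT A =====
-- 'del inner[k]' on a dict: remove the (unique) binding of k; first match on the assoc list.
def pvDelFirst (inner : List (String × Int)) (k : String) : List (String × Int) :=
  match inner with
  | [] => []
  | q :: rest => if q.1 == k then rest else q :: pvDelFirst rest k

-- 'dct_copy[kk]' lookup + in-place mutation: rewrite the first entry whose key is kk.
def pvModifyFirst (acc : List (String × List (String × Int))) (kk : String) (k : String) :
    List (String × List (String × Int)) :=
  match acc with
  | [] => []
  | p :: rest => if p.1 == kk then (p.1, pvDelFirst p.2 k) :: rest else p :: pvModifyFirst rest kk k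

-- A: dct_copy = deepcopy(dct); for k in keys: for kk in dct: try del dct_copy[kk][k] except KeyError: pass
def delete_keys_dict (dct : List (String × List (String × Int))) (keys : List String) :
    List (String × List (String × Int)) :=
  keys.foldl (fun acc k =>
    (dct.map Prod.fst).foldl (fun a kk => pvModifyFirst a kk k) acc) dct

-- ===== PORT B =====
-- B: key_set = set(keys); {k: {kk: v for kk, v in inner.items() if kk not in key_set} for k, inner in dct.items()}
def delete_keys_dict_alt (dct : List (String × List (String × Int))) (keys : List String) :
    List (String × List (String × Int)) :=
  let key_set := PySem.Set.ofList keys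
  dct.map (fun p => (p.1, p.2.filter (fun q => !(key_set.contains q.1))))

-- ===== PRECONDITION & SPEC =====
-- Pre_ excludes association lists with duplicate outer or duplicate inner keys: such lists do not
-- represent Python dicts (A's arguments are dicts, whose keys are unique), so A's behaviour on them
-- is not defined by the Python at all.
def Pre_delete_keys_dict (dct : List (String × List (String × Int))) (keys : List String) : Prop :=
  (dct.map Prod.fst).Nodup ∧ ∀ p ∈ dct, (p.2.map Prod.fst).Nodup
instance (dct : List (String × List (String × Int))) (keys : List String) : Decidable (Pre_delete_keys_dict dct keys) := by unfold Pre_delete_keys_dict; infer_instance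

def pvWitness_delete_keys_dict : (List (String × List (String × Int))) × List String :=
  ([("a", [("x", 1), ("y", 2)]), ("b", [("x", 3)])], ["x", "z"])

def Spec_delete_keys_dict (dct : List (String × List (String × Int))) (keys : List String) (out : List (String × List (String × Int))) : Prop := out = delete_keys_dict_alt dct keys
instance (dct : List (String × List (String × Int))) (keys : List String) (out : List (String × List (String × Int))) : Decidable (Spec_delete_keys_dict dct keys out) := by unfold Spec_delete_keys_dict; infer_instance

-- ===== CLAIM (what is proved, stated in full; the proofs are below) =====
def Claim_equal_delete_keys_dict : Prop := ∀ (dct : List (String × List (String × Int))) (keys : List String), Dom_delete_keys_dict dct keys → Pre_delete_keys_dict dct keys → Spec_delete_keys_dict dct keys (delete_keys_dict dct keys)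

-- ===== LEMMAS AND PROOFS =====

-- A modify-pass never dives into a head whose key is not in the iterated key list.
lemma pv_foldl_modify_skip (ks : List String) (q : String × List (String × Int))
    (rest : List (String × List (String × Int))) (k : String)
    (h : ∀ kk ∈ ks, q.1 ≠ kk) :
    ks.foldl (fun a kk => pvModifyFirst a kk k) (q :: rest)
      = q :: ks.foldl (fun a kk => pvModifyFirst a kk k) rest := by
  induction ks generalizing rest with
  | nil => rfl
  | cons kk ks ih =>
      have hne : (q.1 == kk) = false := by
        simp [h kk (by simp)]
      simp only [List.foldl_cons, pvModifyFirst, hne]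
      exact ih _ (fun x hx => h x (by simp [hx]))

-- One pass of A (one fixed k, folding over the accumulator's own key list) rewrites every inner dict.
lemma pv_pass (acc : List (String × List (String × Int))) (k : String)
    (h : (acc.map Prod.fst).Nodup) :
    (acc.map Prod.fst).foldl (fun a kk => pvModifyFirst a kk k) acc
      = acc.map (fun p => (p.1, pvDelFirst p.2 k)) := by
  induction acc with
  | nil => rfl
  | cons p rest ih =>
      simp only [List.map_cons, List.foldl_cons, pvModifyFirst, BEq.rfl, if_true]
      have hnotin : p.1 ∉ rest.map Prod.fst := (List.nodup_cons.mp h).1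
      rw [pv_foldl_modify_skip (rest.map Prod.fst) (p.1, pvDelFirst p.2 k) rest k
            (fun kk hkk he => hnotin (he ▸ hkk))]
      rw [ih (List.nodup_cons.mp h).2]

-- All of A's passes together: every inner dict gets the whole key fold applied.
lemma pv_main (keys : List String) (dct acc : List (String × List (String × Int)))
    (hk : acc.map Prod.fst = dct.map Prod.fst) (h : (dct.map Prod.fst).Nodup) :
    keys.foldl (fun a k => (dct.map Prod.fst).foldl (fun a2 kk => pvModifyFirst a2 kk k) a) acc
      = acc.map (fun p => (p.1, keys.foldl (fun i k => pvDelFirst i k) p.2)) := by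
  induction keys generalizing acc with
  | nil => simp
  | cons k ks ih =>
      simp only [List.foldl_cons]
      rw [← hk, pv_pass acc k (hk ▸ h), hk]
      rw [ih (acc.map (fun p => (p.1, pvDelFirst p.2 k))) (by rw [← hk]; simp [List.map_map])]
      simp [List.map_map]

-- Under unique inner keys, deleting the first binding of k is filtering k out.
lemma pv_del_eq_filter (v : List (String × Int)) (k : String)
    (h : (v.map Prod.fst).Nodup) :
    pvDelFirst v k = v.filter (fun q => !(q.1 == k)) := by
  induction v with
  | nil => rfl
  | cons q rest ih =>
      by_cases hq : q.1 = k
      · have hb : (q.1 == k) = true := by simp [hq]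
        have hnotin : k ∉ rest.map Prod.fst := hq ▸ (List.nodup_cons.mp h).1
        simp only [pvDelFirst, hb, if_true, List.filter_cons, Bool.not_true,
          Bool.false_eq_true, if_false]
        rw [eq_comm]
        apply List.filter_eq_self.mpr
        intro x hx
        have hxk : x.1 ≠ k := fun he => hnotin (he ▸ List.mem_map_of_mem hx)
        simp [hxk]
      · have hne : (q.1 == k) = false := by simp [hq]
        simp [pvDelFirst, hne, ih (List.nodup_cons.mp h).2]

-- Folding the single-key deletions over all keys is one filter against the key list.
lemma pv_fold_del_eq_filter (keys : List String) (v : List (String × Int))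
    (h : (v.map Prod.fst).Nodup) :
    keys.foldl (fun i k => pvDelFirst i k) v
      = v.filter (fun q => !(keys.contains q.1)) := by
  induction keys generalizing v with
  | nil => simp
  | cons k ks ih =>
      simp only [List.foldl_cons]
      rw [pv_del_eq_filter v k h]
      have hnd : ((v.filter (fun q => !(q.1 == k))).map Prod.fst).Nodup :=
        List.Nodup.sublist (List.Sublist.map Prod.fst List.filter_sublist) h
      rw [ih _ hnd, List.filter_filter]
      apply List.filter_congr
      intro x _
      cases hxk : (x.1 == k) <;> simp_all

-- ===== VERDICT (by name: the statement is the Claim_ definition above) =====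
theorem delete_keys_dict_spec : Claim_equal_delete_keys_dict := by
  intro dct keys _ hpre
  obtain ⟨h1, h2⟩ := hpre
  unfold Spec_delete_keys_dict delete_keys_dict delete_keys_dict_alt
  rw [pv_main keys dct dct rfl h1]
  apply List.map_congr_left
  intro p hp
  rw [pv_fold_del_eq_filter keys p.2 (h2 p hp)]
  congr 1
  apply List.filter_congr
  intro x _
  congr 1
  simp [PySem.Set.contains, PySem.Set.mem_ofList]
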